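-- pv_equiv track=rewrite | github.com/contemmcm/psymatrix | scripts/eval_nnet.py | extract_prob_topk
-- ===== SOURCE A (Python) =====
-- def extract_prob_topk(predictions, targets):
--     """
--     Calculates the probabilty of selecting the optimal model in the top-k.
--     """
--     topk_vec = []
--
--     for k in range(len(predictions)):
--         if targets[0] in predictions[: (k + 1)]:
--             topk_vec.append(1)
--         else:
--             topk_vec.append(0)
--
--     return topk_vec
-- ===== SOURCE B (Python) =====
-- def extract_prob_topk(predictions, targets):
--     # Faster: find the first occurrence of targets[0] once, then emit 0s and 1s.
--     if not predictions:
--         return []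
--     t = targets[0]
--     try:
--         i = predictions.index(t)
--     except ValueError:
--         return [0] * len(predictions)
--     return [0] * i + [1] * (len(predictions) - i)
-- ===== Notes on version B (the rewrite author's own statement) =====
-- stated objective: faster
-- what changed: B locates the first occurrence of targets[0] in predictions once and emits the 0-prefix and 1-suffix directly, instead of re-scanning a growing slice for every k.
import Mathlib
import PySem

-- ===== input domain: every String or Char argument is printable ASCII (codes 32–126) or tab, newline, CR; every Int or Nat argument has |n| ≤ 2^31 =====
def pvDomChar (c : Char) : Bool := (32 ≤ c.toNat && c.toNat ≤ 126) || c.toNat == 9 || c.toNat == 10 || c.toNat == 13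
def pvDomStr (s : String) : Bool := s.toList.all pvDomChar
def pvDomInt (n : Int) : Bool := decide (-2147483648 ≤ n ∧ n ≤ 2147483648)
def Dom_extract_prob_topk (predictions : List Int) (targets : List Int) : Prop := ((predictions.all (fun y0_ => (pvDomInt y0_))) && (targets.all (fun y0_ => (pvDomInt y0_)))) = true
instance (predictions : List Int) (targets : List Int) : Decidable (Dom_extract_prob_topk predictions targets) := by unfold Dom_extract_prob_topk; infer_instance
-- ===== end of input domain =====

-- B replaces A's quadratic rescans of growing slices by one index lookup; return value only, no mutation.

-- ===== PORT A =====
-- for k in range(len(predictions)): append 1 if targets[0] in predictions[:k+1] else 0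
def extract_prob_topk (predictions : List Int) (targets : List Int) : List Int :=
  (PySem.List.pyRange 0 predictions.length 1).foldl
    (fun acc k =>
      if PySem.List.pyGetD targets 0 0 ∈ PySem.List.slice predictions none (some (k + 1))
      then acc ++ [1] else acc ++ [0]) []

-- ===== PORT B =====
def extract_prob_topk_alt (predictions : List Int) (targets : List Int) : List Int :=
  if predictions.isEmpty then []
  else
    match PySem.List.index? predictions (PySem.List.pyGetD targets 0 0) with
    | some i => List.replicate i 0 ++ List.replicate (predictions.length - i) 1
    | none => List.replicate predictions.length 0

-- ===== PRECONDITION & SPEC =====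
-- Pre_ excludes only inputs where A raises IndexError (targets empty while predictions nonempty).
def Pre_extract_prob_topk (predictions : List Int) (targets : List Int) : Prop :=
  predictions = [] ∨ targets ≠ []
instance (predictions : List Int) (targets : List Int) : Decidable (Pre_extract_prob_topk predictions targets) := by unfold Pre_extract_prob_topk; infer_instance
def pvWitness_extract_prob_topk : List Int × List Int := ([3, 1, 2, 1], [1])

def Spec_extract_prob_topk (predictions : List Int) (targets : List Int) (out : List Int) : Prop := out = extract_prob_topk_alt predictions targets
instance (predictions : List Int) (targets : List Int) (out : List Int) : Decidable (Spec_extract_prob_topk predictions targets out) := by unfold Spec_extract_prob_topk; infer_instance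

-- ===== CLAIM (what is proved, stated in full; the proofs are below) =====
def Claim_equal_extract_prob_topk : Prop := ∀ (predictions : List Int) (targets : List Int), Dom_extract_prob_topk predictions targets → Pre_extract_prob_topk predictions targets → Spec_extract_prob_topk predictions targets (extract_prob_topk predictions targets)

-- ===== LEMMAS AND PROOFS =====

-- A's loop, abstracted: the 0/1 appends form the map of the indicator over the range.
theorem pv_foldl_indicator {α : Type} (p : α → Prop) [DecidablePred p] (l : List α) (init : List Int) :
    l.foldl (fun acc k => if p k then acc ++ [1] else acc ++ [0]) init
      = init ++ l.map (fun k => if p k then (1 : Int) else 0) := by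
  induction l generalizing init with
  | nil => simp
  | cons x xs ih => simp [List.foldl_cons, ih]; split_ifs <;> simp

-- A's result as a map over List.range.
theorem pv_a_eq_map (predictions : List Int) (t : Int) :
    (PySem.List.pyRange 0 predictions.length 1).foldl
      (fun acc k => if t ∈ PySem.List.slice predictions none (some (k + 1))
                    then acc ++ [1] else acc ++ [0]) []
    = (List.range predictions.length).map
        (fun j => if t ∈ predictions.take (j + 1) then (1 : Int) else 0) := by
  rw [PySem.List.pyRange_one, pv_foldl_indicator, List.map_map]
  simp only [List.nil_append]
  apply List.map_congr_left
  intro j hj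
  have : ((0 : Int) + (j : Int) + 1) = ((j + 1 : Nat) : Int) := by push_cast; ring
  simp only [Function.comp, this, PySem.List.slice_to_natCast]

theorem pv_map_ge (n i : Nat) (hi : i ≤ n) :
    (List.range n).map (fun j => if i ≤ j then (1 : Int) else 0)
      = List.replicate i 0 ++ List.replicate (n - i) 1 := by
  have hn : n = i + (n - i) := by omega
  rw [hn, List.range_add, List.map_append, List.map_map]
  congr 1
  · rw [List.eq_replicate_iff]
    constructor
    · simp
    · intro b hb
      simp only [List.mem_map, List.mem_range] at hb
      obtain ⟨j, hj, rfl⟩ := hb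
      simp [Nat.not_le.mpr hj]
  · rw [List.eq_replicate_iff]
    constructor
    · simp
    · intro b hb
      simp only [List.mem_map, List.mem_range, Function.comp] at hb
      obtain ⟨j, hj, rfl⟩ := hb
      simp

-- ===== VERDICT (by name: the statement is the Claim_ definition above) =====
theorem extract_prob_topk_spec : Claim_equal_extract_prob_topk := by
  intro predictions targets _ _
  unfold Spec_extract_prob_topk extract_prob_topk extract_prob_topk_alt
  set t := PySem.List.pyGetD targets 0 0 with ht
  rw [pv_a_eq_map]
  by_cases hemp : predictions.isEmpty
  · simp_all [List.isEmpty_iff]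
  · rw [Bool.not_eq_true] at hemp
    cases hidx : PySem.List.index? predictions t with
    | none =>
      have hnm : t ∉ predictions := (PySem.List.index?_eq_none_iff _ _).mp hidx
      simp only [hemp, Bool.false_eq_true, if_false]
      rw [List.eq_replicate_iff]
      refine ⟨by simp, ?_⟩
      intro b hb
      simp only [List.mem_map, List.mem_range] at hb
      obtain ⟨j, hj, rfl⟩ := hb
      have : t ∉ predictions.take (j + 1) := fun h => hnm (List.mem_of_mem_take h)
      simp [this]
    | some i =>
      obtain ⟨hk, hget, hmin⟩ := PySem.List.getElem_of_index?_eq_some hidx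
      have key : ∀ j, t ∈ predictions.take (j + 1) ↔ i ≤ j := by
        intro j
        constructor
        · intro hmem
          by_contra hlt
          obtain ⟨m, hm, hmv⟩ := List.getElem_of_mem hmem
          have hm' : m < j + 1 := by
            have := hm; simp [List.length_take] at this; omega
          have hmlen : m < predictions.length := by
            have := hm; simp [List.length_take] at this; omega
          rw [List.getElem_take] at hmv
          exact hmin m (by omega) hmv
        · intro hij
          have hlen : i < (predictions.take (j+1)).length := by
            simp [List.length_take]; omega
          have : (predictions.take (j+1))[i]'hlen = t := by
            rw [List.getElem_take]; exact hget
          exact this ▸ List.getElem_mem _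
      have hmapeq : (List.range predictions.length).map (fun j => if t ∈ predictions.take (j + 1) then (1:Int) else 0)
           = (List.range predictions.length).map (fun j => if i ≤ j then (1:Int) else 0) := by
        apply List.map_congr_left; intro j _; simp [key j]
      simp only [hemp, Bool.false_eq_true, if_false]
      rw [hmapeq, pv_map_ge _ _ (le_of_lt hk)]
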